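-- pv_equiv track=rewrite | github.com/XSpoonAi/spoon-core | spoon_ai/x402/client.py | _extract_challenges
-- ===== SOURCE A (Python) =====
-- def _extract_challenges(header_value: str) -> list[str]:
--     """Split a ``WWW-Authenticate`` header into individual challenges."""
--
--     parts: list[str] = []
--     current = []
--     in_quotes = False
--     for char in header_value:
--         if char == '"':
--             in_quotes = not in_quotes
--         if char == ',' and not in_quotes:
--             part = ''.join(current).strip()
--             if part:
--                 parts.append(part)
--             current = []
--             continue
--         current.append(char)
--     final = ''.join(current).strip()
--     if final:
--         parts.append(final)
--     return parts
-- ===== SOURCE B (Python) =====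
-- def _extract_challenges(header_value: str) -> list[str]:
--     """Split a ``WWW-Authenticate`` header into individual challenges."""
--
--     parts: list[str] = []
--     acc = None
--     for piece in header_value.split(','):
--         acc = piece if acc is None else acc + ',' + piece
--         if acc.count('"') % 2 == 0:
--             part = acc.strip()
--             if part:
--                 parts.append(part)
--             acc = None
--     if acc is not None:
--         part = acc.strip()
--         if part:
--             parts.append(part)
--     return parts
-- ===== Notes on version B (the rewrite author's own statement) =====
-- stated objective: faster
-- what changed: B first splits the header at every comma with str.split and then re-merges adjacent pieces while the accumulated piece contains an odd number of double-quote characters (quote-parity check), instead of A's character-by-character scan with an in_quotes toggle.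
import Mathlib
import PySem

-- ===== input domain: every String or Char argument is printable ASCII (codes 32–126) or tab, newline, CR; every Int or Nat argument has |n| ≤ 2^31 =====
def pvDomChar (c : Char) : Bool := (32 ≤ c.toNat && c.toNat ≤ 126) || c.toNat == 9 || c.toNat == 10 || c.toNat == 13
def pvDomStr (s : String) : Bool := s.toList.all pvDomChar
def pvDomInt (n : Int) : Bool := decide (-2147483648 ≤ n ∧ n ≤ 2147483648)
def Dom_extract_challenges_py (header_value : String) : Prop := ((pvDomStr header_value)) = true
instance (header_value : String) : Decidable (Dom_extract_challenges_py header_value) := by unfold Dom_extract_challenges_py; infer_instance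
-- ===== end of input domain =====

-- B replaces A's character-by-character scan (in_quotes toggle) with split(',') followed by
-- quote-parity re-merging of the pieces; a different decomposition at the same O(n) cost.

-- ===== PORT A =====
-- A's loop body: state (parts, current, in_quotes)
def pvAStep (st : List String × List Char × Bool) (c : Char) : List String × List Char × Bool :=
  let inq := if c = '"' then !st.2.2 else st.2.2
  if c = ',' ∧ inq = false then
    let part := PySem.Chars.strip st.2.1
    (if part ≠ [] then st.1 ++ [String.ofList part] else st.1, [], inq)
  else
    (st.1, st.2.1 ++ [c], inq)

def extract_challenges_py (header_value : String) : List String :=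
  let st := header_value.toList.foldl pvAStep ([], [], false)
  let fin := PySem.Chars.strip st.2.1
  if fin ≠ [] then st.1 ++ [String.ofList fin] else st.1

-- ===== PORT B =====
-- B's loop body: state (parts, accumulator of pieces not yet closed by an even number of quotes)
def pvBStep (st : List String × Option (List Char)) (piece : List Char) : List String × Option (List Char) :=
  let acc := match st.2 with
             | none => piece
             | some s => s ++ [','] ++ piece
  if PySem.Chars.count acc ['"'] % 2 == 0 then
    let part := PySem.Chars.strip acc
    (if part ≠ [] then st.1 ++ [String.ofList part] else st.1, none)
  else
    (st.1, some acc)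

def extract_challenges_py_alt (header_value : String) : List String :=
  let st := (PySem.Chars.splitOn header_value.toList [',']).foldl pvBStep ([], none)
  match st.2 with
  | none => st.1
  | some a =>
    let part := PySem.Chars.strip a
    if part ≠ [] then st.1 ++ [String.ofList part] else st.1

-- ===== PRECONDITION & SPEC =====
def Spec_extract_challenges_py (header_value : String) (out : List String) : Prop := out = extract_challenges_py_alt header_value
instance (header_value : String) (out : List String) : Decidable (Spec_extract_challenges_py header_value out) := by unfold Spec_extract_challenges_py; infer_instance

-- ===== CLAIM (what is proved, stated in full; the proofs are below) =====
def Claim_equal_extract_challenges_py : Prop := ∀ (header_value : String), Dom_extract_challenges_py header_value → Spec_extract_challenges_py header_value (extract_challenges_py header_value)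

-- ===== LEMMAS AND PROOFS =====

-- the comma-split of a char list, as a plain structural recursion
def pvPieces : List Char → List (List Char)
  | [] => [[]]
  | c :: rest =>
    if c = ',' then [] :: pvPieces rest
    else match pvPieces rest with
         | [] => [[c]]
         | p :: ps => (c :: p) :: ps

-- the inverse: rejoin pieces with commas
def pvJoin : List (List Char) → List Char
  | [] => []
  | [p] => p
  | p :: q :: rest => p ++ ',' :: pvJoin (q :: rest)

-- the shared finishing step of both loops, used to state the invariant lemma
def pvFinish (parts : List String) (cs : List Char) : List String :=
  if PySem.Chars.strip cs ≠ [] then parts ++ [String.ofList (PySem.Chars.strip cs)] else parts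

theorem pvPieces_ne_nil (cs : List Char) : pvPieces cs ≠ [] := by
  cases cs with
  | nil => simp [pvPieces]
  | cons c rest =>
    simp only [pvPieces]
    split
    · simp
    · split <;> simp

theorem pvJoin_pieces (cs : List Char) : pvJoin (pvPieces cs) = cs := by
  induction cs with
  | nil => rfl
  | cons c rest ih =>
    simp only [pvPieces]
    split
    · rename_i h
      subst h
      rcases hp : pvPieces rest with _ | ⟨p, ps⟩
      · exact absurd hp (pvPieces_ne_nil rest)
      · rw [hp] at ih; simp [pvJoin, ih]
    · rcases hp : pvPieces rest with _ | ⟨p, ps⟩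
      · exact absurd hp (pvPieces_ne_nil rest)
      · rw [hp] at ih
        cases ps with
        | nil => simpa [pvJoin] using congrArg (c :: ·) ih
        | cons q qs => simpa [pvJoin] using congrArg (c :: ·) ih

theorem pvPieces_comma_free (cs : List Char) : ∀ p ∈ pvPieces cs, ',' ∉ p := by
  induction cs with
  | nil => simp [pvPieces]
  | cons c rest ih =>
    simp only [pvPieces]
    split
    · intro p hp
      rcases List.mem_cons.mp hp with hp | hp
      · simp [hp]
      · exact ih p hp
    · rename_i hc
      rcases hp : pvPieces rest with _ | ⟨p, ps⟩
      · exact absurd hp (pvPieces_ne_nil rest)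
      · rw [hp] at ih
        intro q hq
        rcases List.mem_cons.mp hq with hq | hq
        · subst hq
          intro hm
          rcases List.mem_cons.mp hm with hm | hm
          · exact hc hm.symm
          · exact ih p (by simp) hm
        · exact ih q (List.mem_cons_of_mem _ hq)

theorem pvSplitOn_go_comma (fuel : Nat) : ∀ (l cur : List Char) (accs : List (List Char)),
    l.length < fuel →
    PySem.Chars.splitOn.go [','] fuel l cur accs =
      accs.reverse ++ (match pvPieces l with
                       | [] => [cur.reverse]
                       | p :: ps => (cur.reverse ++ p) :: ps) := by
  induction fuel with
  | zero => intro l cur accs h; omega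
  | succ n ih =>
    intro l cur accs h
    cases l with
    | nil => simp [PySem.Chars.splitOn.go, pvPieces]
    | cons c rest =>
      by_cases hc : c = ','
      · subst hc
        rw [PySem.Chars.splitOn.go]
        simp only [List.isPrefixOf, beq_self_eq_true, Bool.true_and, if_true, List.length_cons,
          List.length_nil, List.drop_succ_cons, List.drop_zero, Nat.zero_add]
        rw [ih rest [] (cur.reverse :: accs) (by simpa using Nat.lt_of_succ_lt_succ h)]
        rcases hp : pvPieces rest with _ | ⟨p, ps⟩
        · exact absurd hp (pvPieces_ne_nil rest)
        · simp [pvPieces, hp]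
      · rw [PySem.Chars.splitOn.go]
        have : [','].isPrefixOf (c :: rest) = false := by
          simp [List.isPrefixOf]
          intro h'; exact absurd h'.symm hc
        rw [this]
        simp only [Bool.false_eq_true, if_false]
        rw [ih rest (c :: cur) accs (by simpa using Nat.lt_of_succ_lt_succ h)]
        rcases hp : pvPieces rest with _ | ⟨p, ps⟩
        · exact absurd hp (pvPieces_ne_nil rest)
        · simp [pvPieces, hc, hp]

theorem pvSplitOn_comma (cs : List Char) : PySem.Chars.splitOn cs [','] = pvPieces cs := by
  rw [PySem.Chars.splitOn, pvSplitOn_go_comma (cs.length + 1) cs [] [] (by omega)]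
  rcases hp : pvPieces cs with _ | ⟨p, ps⟩
  · exact absurd hp (pvPieces_ne_nil cs)
  · simp

theorem pvCount_go_quote (l : List Char) : ∀ (fuel acc : Nat), l.length ≤ fuel →
    PySem.Chars.count.go ['"'] fuel l acc = acc + l.count '"' := by
  induction l with
  | nil => intro fuel acc h; cases fuel <;> simp [PySem.Chars.count.go]
  | cons c rest ih =>
    intro fuel acc h
    cases fuel with
    | zero => simp at h
    | succ n =>
      rw [PySem.Chars.count.go]
      by_cases hc : c = '"'
      · subst hc
        simp only [List.isPrefixOf, beq_self_eq_true, Bool.true_and, if_true, List.length_cons,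
          List.length_nil, List.drop_succ_cons, List.drop_zero, Nat.zero_add]
        rw [ih n (acc + 1) (by simpa using h)]
        simp
        omega
      · have hpre : [(Char.ofNat 34)].isPrefixOf (c :: rest) = false := by
          simp only [List.isPrefixOf, Bool.and_eq_false_imp, beq_iff_eq]
          exact fun h' => absurd h'.symm hc
        rw [hpre]
        simp only [Bool.false_eq_true, if_false]
        rw [ih n acc (by simpa using h)]
        simp [hc]

theorem pvCount_quote (cs : List Char) : PySem.Chars.count cs ['"'] = cs.count '"' := by
  rw [PySem.Chars.count]
  simp [pvCount_go_quote cs cs.length 0 (le_refl _)]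

theorem pvA_chunk (p : List Char) : ∀ (parts : List String) (cur : List Char) (inq : Bool),
    ',' ∉ p →
    List.foldl pvAStep (parts, cur, inq) p =
      (parts, cur ++ p, xor inq (decide (p.count '"' % 2 = 1))) := by
  induction p with
  | nil => intro parts cur inq _; simp
  | cons c rest ih =>
    intro parts cur inq hfree
    have hc : c ≠ ',' := fun h => hfree (h ▸ List.mem_cons_self ..)
    have hrest : ',' ∉ rest := fun h => hfree (List.mem_cons_of_mem _ h)
    simp only [List.foldl_cons]
    rw [show pvAStep (parts, cur, inq) c = (parts, cur ++ [c], if c = '"' then !inq else inq) by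
      simp [pvAStep, hc]]
    rw [ih parts (cur ++ [c]) _ hrest]
    by_cases hq : c = '"'
    · subst hq
      simp
      rcases Nat.even_or_odd (rest.count '"') with he | ho <;>
        cases inq <;>
        simp_all [Nat.even_iff, Nat.odd_iff, Nat.add_mod]
    · simp [hq]

theorem pvMain (ps : List (List Char)) : ∀ (parts : List String) (cur : List Char) (acc : Option (List Char)),
    (∀ p ∈ ps, ',' ∉ p) →
    (match acc with
     | none => cur = []
     | some s => cur = s ++ [','] ∧ s.count '"' % 2 = 1) →
    (ps = [] → acc = none) →
    (let st := List.foldl pvAStep (parts, cur, acc.isSome) (pvJoin ps)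
     pvFinish st.1 st.2.1) =
    (let st := List.foldl pvBStep (parts, acc) ps
     match st.2 with
     | none => st.1
     | some a => pvFinish st.1 a) := by
  induction ps with
  | nil =>
    intro parts cur acc hfree hrel hnil
    have h0 : acc = none := hnil rfl
    subst h0
    simp only at hrel
    subst hrel
    simp [pvJoin, pvFinish, show PySem.Chars.strip ([] : List Char) = [] from by decide]
  | cons p rest ih =>
    intro parts cur acc hfree hrel hnil
    have hpfree : ',' ∉ p := hfree p (List.mem_cons_self ..)
    clear hnil
    have hrel' : (acc = none ∧ cur = []) ∨
        (∃ s, acc = some s ∧ cur = s ++ [','] ∧ s.count '"' % 2 = 1) := by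
      cases acc with
      | none => exact Or.inl ⟨rfl, hrel⟩
      | some s => exact Or.inr ⟨s, rfl, hrel.1, hrel.2⟩
    clear hrel
    rcases hrel' with ⟨h0, hcur⟩ | ⟨s, h0, hcur, hs⟩
    · -- accumulator closed: cur = [], in_quotes = false
      subst h0; subst hcur
      have hcond : ((PySem.Chars.count (([] : List Char) ++ p) ['"'] % 2 == 0) : Bool)
          = !(xor false (decide (p.count '"' % 2 = 1))) := by
        rw [pvCount_quote]
        simp only [List.nil_append, Bool.false_xor]
        rcases Nat.mod_two_eq_zero_or_one (p.count '"') with h2 | h2 <;> simp [h2]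
      have hB : pvBStep (parts, none) p =
          (if !(xor false (decide (p.count '"' % 2 = 1))) then
             (pvFinish parts (([] : List Char) ++ p), none)
           else (parts, some (([] : List Char) ++ p))) := by
        simp only [pvBStep, pvFinish, List.nil_append]
        rw [show ((PySem.Chars.count p ['"'] % 2 == 0) : Bool)
            = !(xor false (decide (p.count '"' % 2 = 1))) by simpa using hcond]
      rw [show (Option.isSome (none : Option (List Char))) = false from rfl]

      cases rest with
      | nil =>
        rw [show pvJoin [p] = p from rfl]
        simp only [List.foldl_cons, List.foldl_nil]
        rw [pvA_chunk p parts ([] : List Char) false hpfree, hB]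
        cases hx : xor false (decide (p.count '"' % 2 = 1)) <;> simp [pvFinish]
      | cons q tail =>
        rw [show pvJoin (p :: q :: tail) = p ++ ',' :: pvJoin (q :: tail) from rfl]
        rw [List.foldl_append]
        rw [pvA_chunk p parts ([] : List Char) false hpfree]
        simp only [List.foldl_cons]
        rw [hB]
        cases hx : xor false (decide (p.count '"' % 2 = 1)) with
        | false =>
          simp only [Bool.not_false, if_true]
          rw [show pvAStep (parts, ([] : List Char) ++ p, false) ',' =
              (pvFinish parts (([] : List Char) ++ p), [], false) by
            simp [pvAStep, pvFinish]]
          simpa using ih (pvFinish parts (([] : List Char) ++ p)) [] none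
            (fun r hr => hfree r (List.mem_cons_of_mem _ hr)) rfl (fun h => rfl)
        | true =>
          simp only [Bool.not_true, Bool.false_eq_true, if_false]
          rw [show pvAStep (parts, ([] : List Char) ++ p, true) ',' =
              (parts, ([] : List Char) ++ p ++ [','], true) by
            simp [pvAStep]]
          have hodd : (([] : List Char) ++ p).count '"' % 2 = 1 := by
            have h2 := hcond
            rw [hx, pvCount_quote] at h2
            simp only [Bool.not_true] at h2
            rcases Nat.mod_two_eq_zero_or_one ((([] : List Char) ++ p).count '"') with h3 | h3
            · rw [h3] at h2; simp at h2
            · exact h3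
          simpa [List.append_assoc] using ih parts (([] : List Char) ++ p ++ [',']) (some (([] : List Char) ++ p))
            (fun r hr => hfree r (List.mem_cons_of_mem _ hr))
            ⟨by simp, hodd⟩ (by simp)
    · -- accumulator open: cur = s ++ [','], in_quotes = true
      subst h0; subst hcur
      have hcond : ((PySem.Chars.count ((s ++ [',']) ++ p) ['"'] % 2 == 0) : Bool)
          = !(xor true (decide (p.count '"' % 2 = 1))) := by
        rw [pvCount_quote]
        simp only [Bool.true_xor, List.count_append, List.append_assoc]
        rw [show List.count '"' [','] = 0 from by decide]
        rcases Nat.mod_two_eq_zero_or_one (p.count '"') with h2 | h2 <;>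
          simp [h2, Nat.add_mod, hs]
      have hB : pvBStep (parts, some s) p =
          (if !(xor true (decide (p.count '"' % 2 = 1))) then
             (pvFinish parts ((s ++ [',']) ++ p), none)
           else (parts, some ((s ++ [',']) ++ p))) := by
        simp only [pvBStep, pvFinish]
        rw [show ((PySem.Chars.count (s ++ [','] ++ p) ['"'] % 2 == 0) : Bool)
            = !(xor true (decide (p.count '"' % 2 = 1))) by simpa [List.append_assoc] using hcond]
      rw [show (Option.isSome (some s)) = true from rfl]

      cases rest with
      | nil =>
        rw [show pvJoin [p] = p from rfl]
        simp only [List.foldl_cons, List.foldl_nil]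
        rw [pvA_chunk p parts (s ++ [',']) true hpfree, hB]
        cases hx : xor true (decide (p.count '"' % 2 = 1)) <;> simp [pvFinish]
      | cons q tail =>
        rw [show pvJoin (p :: q :: tail) = p ++ ',' :: pvJoin (q :: tail) from rfl]
        rw [List.foldl_append]
        rw [pvA_chunk p parts (s ++ [',']) true hpfree]
        simp only [List.foldl_cons]
        rw [hB]
        cases hx : xor true (decide (p.count '"' % 2 = 1)) with
        | false =>
          simp only [Bool.not_false, if_true]
          rw [show pvAStep (parts, (s ++ [',']) ++ p, false) ',' =
              (pvFinish parts ((s ++ [',']) ++ p), [], false) by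
            simp [pvAStep, pvFinish]]
          simpa using ih (pvFinish parts ((s ++ [',']) ++ p)) [] none
            (fun r hr => hfree r (List.mem_cons_of_mem _ hr)) rfl (fun h => rfl)
        | true =>
          simp only [Bool.not_true, Bool.false_eq_true, if_false]
          rw [show pvAStep (parts, (s ++ [',']) ++ p, true) ',' =
              (parts, (s ++ [',']) ++ p ++ [','], true) by
            simp [pvAStep]]
          have hodd : ((s ++ [',']) ++ p).count '"' % 2 = 1 := by
            have h2 := hcond
            rw [hx, pvCount_quote] at h2
            simp only [Bool.not_true] at h2
            rcases Nat.mod_two_eq_zero_or_one (((s ++ [',']) ++ p).count '"') with h3 | h3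
            · rw [h3] at h2; simp at h2
            · exact h3
          simpa [List.append_assoc] using ih parts ((s ++ [',']) ++ p ++ [',']) (some ((s ++ [',']) ++ p))
            (fun r hr => hfree r (List.mem_cons_of_mem _ hr))
            ⟨by simp, hodd⟩ (by simp)

-- ===== VERDICT (by name: the statement is the Claim_ definition above) =====
theorem extract_challenges_py_spec : Claim_equal_extract_challenges_py := by
  intro header_value _
  unfold Spec_extract_challenges_py
  unfold extract_challenges_py extract_challenges_py_alt
  rw [pvSplitOn_comma]
  have h := pvMain (pvPieces header_value.toList) [] [] none
    (pvPieces_comma_free header_value.toList) rfl (fun _ => rfl)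
  rw [pvJoin_pieces] at h
  simpa [pvFinish] using h
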